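-- pv_equiv track=rewrite | github.com/4lbertoDelgado/python | coursera/intro_prog_python/pruebafun.py | ocurrencias
-- ===== SOURCE A (Python) =====
-- def ocurrencias(string):
--     unos = 0
--     ceros = 0
--     # Recorremos to do el string
--     for i in string:
--         if i == "1":
--             unos += 1
--         else:
--             ceros += 1
--
--     return unos - ceros
-- ===== SOURCE B (Python) =====
-- def ocurrencias(string):
--     n = len(string)
--     if n == 0:
--         return 0
--     if n == 1:
--         return 1 if string == "1" else -1
--     m = n // 2
--     return ocurrencias(string[:m]) + ocurrencias(string[m:])
-- ===== Notes on version B (the rewrite author's own statement) =====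
-- stated objective: alternative
-- what changed: Replaces the single-pass two-counter loop by divide-and-conquer recursion: a one-character string scores +1 for '1' and -1 otherwise, and a longer string is split in half and the two scores added.
import Mathlib
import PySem

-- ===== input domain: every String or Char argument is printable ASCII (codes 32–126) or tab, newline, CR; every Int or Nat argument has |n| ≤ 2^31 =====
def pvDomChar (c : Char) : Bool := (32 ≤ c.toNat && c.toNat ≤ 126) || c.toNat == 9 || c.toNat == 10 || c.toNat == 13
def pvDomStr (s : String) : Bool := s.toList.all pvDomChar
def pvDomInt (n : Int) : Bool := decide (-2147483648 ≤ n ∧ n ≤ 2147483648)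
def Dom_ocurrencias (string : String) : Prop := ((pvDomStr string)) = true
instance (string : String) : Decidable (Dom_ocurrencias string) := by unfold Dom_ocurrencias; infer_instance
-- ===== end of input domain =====

-- B replaces A's two-counter loop by divide-and-conquer recursion on string halves (objective: alternative, same cost).

-- ===== PORT A =====
-- loop over the characters, accumulating (unos, ceros); return unos - ceros
def ocurrencias (string : String) : Int :=
  let p := string.toList.foldl
    (fun (acc : Int × Int) i => if i = '1' then (acc.1 + 1, acc.2) else (acc.1, acc.2 + 1))
    (0, 0)
  p.1 - p.2

-- ===== PORT B =====
-- base cases: empty string → 0, one char → ±1; otherwise split at n // 2 and add the halves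
def ocurrenciasAltRec (l : List Char) : Int :=
  if l.length = 0 then 0
  else if l.length = 1 then (if l = ['1'] then 1 else -1)
  else
    ocurrenciasAltRec (l.take (l.length / 2)) + ocurrenciasAltRec (l.drop (l.length / 2))
termination_by l.length
decreasing_by
  · simp only [List.length_take]; omega
  · simp only [List.length_drop]; omega

def ocurrencias_alt (string : String) : Int := ocurrenciasAltRec string.toList

-- ===== PRECONDITION & SPEC =====
def Spec_ocurrencias (string : String) (out : Int) : Prop := out = ocurrencias_alt string
instance (string : String) (out : Int) : Decidable (Spec_ocurrencias string out) := by unfold Spec_ocurrencias; infer_instance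

-- ===== CLAIM (what is proved, stated in full; the proofs are below) =====
def Claim_equal_ocurrencias : Prop := ∀ (string : String), Dom_ocurrencias string → Spec_ocurrencias string (ocurrencias string)

-- ===== LEMMAS AND PROOFS =====

-- A's loop invariant: the fold adds (count '1' l, length - count '1' l) to the start state
theorem ocurrencias_foldl (l : List Char) (a b : Int) :
    l.foldl (fun (acc : Int × Int) i => if i = '1' then (acc.1 + 1, acc.2) else (acc.1, acc.2 + 1)) (a, b)
      = (a + l.count '1', b + (l.length - l.count '1')) := by
  induction l generalizing a b with
  | nil => simp
  | cons c t ih =>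
    by_cases h : c = '1' <;> simp [List.foldl, h, ih] <;> ring

-- B's recursion computes 2*count('1') - length (by strong induction on the length)
theorem ocurrenciasAltRec_eq (l : List Char) :
    ocurrenciasAltRec l = 2 * (l.count '1') - l.length := by
  induction l using ocurrenciasAltRec.induct with
  | case1 l h => unfold ocurrenciasAltRec; simp_all
  | case2 h0 h1 =>
    unfold ocurrenciasAltRec; simp
  | case3 x h0 h1 h2 =>
    unfold ocurrenciasAltRec
    rw [if_neg h0, if_pos h1, if_neg h2]
    match x, h1, h2 with
    | [c], _, h2 =>
      have hc : c ≠ '1' := fun h => h2 (by rw [h])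
      simp [hc]
  | case4 l h0 h1 ih1 ih2 =>
    unfold ocurrenciasAltRec
    rw [if_neg h0, if_neg h1, ih1, ih2]
    have hc : (l.take (l.length / 2)).count '1' + (l.drop (l.length / 2)).count '1' = l.count '1' := by
      rw [← List.count_append, List.take_append_drop]
    have hl : (l.take (l.length / 2)).length + (l.drop (l.length / 2)).length = l.length := by
      simp only [List.length_take, List.length_drop]; omega
    omega

theorem ocurrencias_spec : Claim_equal_ocurrencias := by
  intro s _
  unfold Spec_ocurrencias ocurrencias ocurrencias_alt
  simp only [ocurrencias_foldl, ocurrenciasAltRec_eq]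
  ring
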